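-- pv_equiv track=rewrite | github.com/Wexlersolk/StrategyBlender | ui/views/ai_training.py | _suggest_param_candidates
-- ===== SOURCE A (Python) =====
-- def _suggest_param_candidates(params: dict) -> list[str]:
--     numeric = {k: v for k, v in params.items() if isinstance(v, (int, float))}
--     preferred = [
--         "_lots",
--         "mmLots",
--         "StopLossCoef1",
--         "ProfitTargetCoef1",
--         "StopLossCoef2",
--         "ProfitTargetCoef2",
--         "TrailingStopCoef1",
--         "TrailingActCef1",
--         "PriceEntryMult1",
--         "IndicatorCrsMAPrd1",
--         "IndicatorCrsMAPrd2",
--     ]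
--     ordered = [name for name in preferred if name in numeric]
--     for name in numeric:
--         if name not in ordered:
--             ordered.append(name)
--     return ordered
-- ===== SOURCE B (Python) =====
-- def _suggest_param_candidates(params: dict) -> list[str]:
--     preferred = [
--         "_lots",
--         "mmLots",
--         "StopLossCoef1",
--         "ProfitTargetCoef1",
--         "StopLossCoef2",
--         "ProfitTargetCoef2",
--         "TrailingStopCoef1",
--         "TrailingActCef1",
--         "PriceEntryMult1",
--         "IndicatorCrsMAPrd1",
--         "IndicatorCrsMAPrd2",
--     ]
--     rank = {name: i for i, name in enumerate(preferred)}
--     numeric = {k: v for k, v in params.items() if isinstance(v, (int, float))}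
--     return sorted(numeric, key=lambda k: rank.get(k, len(preferred)))
-- ===== Notes on version B (the rewrite author's own statement) =====
-- stated objective: faster
-- what changed: Replaces A's two passes (a preferred-filter pass plus a loop that appends each remaining key after scanning the growing output with 'not in') by a rank table built once and a single stable sort of the numeric keys with rank.get(k, len(preferred)) as key.
import Mathlib
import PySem

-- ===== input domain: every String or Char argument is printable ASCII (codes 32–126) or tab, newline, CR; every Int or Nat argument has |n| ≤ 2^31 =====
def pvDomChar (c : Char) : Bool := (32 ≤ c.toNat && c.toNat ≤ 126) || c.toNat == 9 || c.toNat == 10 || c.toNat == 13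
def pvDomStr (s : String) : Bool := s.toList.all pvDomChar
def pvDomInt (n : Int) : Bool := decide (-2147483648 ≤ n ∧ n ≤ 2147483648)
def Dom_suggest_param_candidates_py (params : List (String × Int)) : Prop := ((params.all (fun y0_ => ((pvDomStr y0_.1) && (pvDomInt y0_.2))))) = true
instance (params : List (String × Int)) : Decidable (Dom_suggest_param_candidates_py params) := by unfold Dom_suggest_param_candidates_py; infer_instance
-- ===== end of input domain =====

-- B replaces A's two scanning passes (preferred filter + membership-scanned append loop) by a
-- rank table plus one stable sort of the numeric keys; same return value, different algorithm.


-- the `preferred` literal both Pythons contain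
def pvPreferred : List String :=
  ["_lots", "mmLots", "StopLossCoef1", "ProfitTargetCoef1", "StopLossCoef2",
   "ProfitTargetCoef2", "TrailingStopCoef1", "TrailingActCef1", "PriceEntryMult1",
   "IndicatorCrsMAPrd1", "IndicatorCrsMAPrd2"]

-- ===== PORT A =====
def suggest_param_candidates_py (params : List (String × Int)) : List String :=
  -- numeric = {k: v for k, v in params.items() if isinstance(v, (int, float))}
  -- (every value is an int here, so the isinstance test is always true)
  let numeric : PySem.Dict String Int :=
    (PySem.Dict.ofList params).items.foldl (fun d kv => d.insert kv.1 kv.2) PySem.Dict.empty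
  let preferred := pvPreferred
  let ordered := preferred.filter (fun name => numeric.contains name)
  -- for name in numeric: if name not in ordered: ordered.append(name)
  numeric.keys.foldl (fun acc name => if acc.contains name then acc else acc ++ [name]) ordered

-- ===== PORT B =====
def suggest_param_candidates_py_alt (params : List (String × Int)) : List String :=
  let preferred := pvPreferred
  -- rank = {name: i for i, name in enumerate(preferred)}
  let rank : PySem.Dict String Int :=
    (PySem.List.enumerate preferred).foldl (fun d p => d.insert p.2 p.1) PySem.Dict.empty
  let numeric : PySem.Dict String Int :=
    (PySem.Dict.ofList params).items.foldl (fun d kv => d.insert kv.1 kv.2) PySem.Dict.empty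
  -- sorted(numeric, key=lambda k: rank.get(k, len(preferred)))
  PySem.List.sorted numeric.keys (fun k => rank.getD k (preferred.length : Int)) false

-- ===== PRECONDITION & SPEC =====
def Spec_suggest_param_candidates_py (params : List (String × Int)) (out : List String) : Prop := out = suggest_param_candidates_py_alt params
instance (params : List (String × Int)) (out : List String) : Decidable (Spec_suggest_param_candidates_py params out) := by unfold Spec_suggest_param_candidates_py; infer_instance

-- ===== CLAIM (what is proved, stated in full; the proofs are below) =====
def Claim_equal_suggest_param_candidates_py : Prop := ∀ (params : List (String × Int)), Dom_suggest_param_candidates_py params → Spec_suggest_param_candidates_py params (suggest_param_candidates_py params)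

-- ===== LEMMAS AND PROOFS =====

-- B's key function, as a named helper for the proofs
def pvRank : PySem.Dict String Int :=
  (PySem.List.enumerate pvPreferred).foldl (fun d p => d.insert p.2 p.1) PySem.Dict.empty

def pvKey (k : String) : Int := pvRank.getD k (pvPreferred.length : Int)

lemma pvKey_not_mem (y : String) (hy : y ∉ pvPreferred) : pvKey y = 11 := by
  unfold pvKey
  rw [PySem.Dict.getD_of_not_contains]
  · rfl
  · rw [PySem.Dict.contains_eq_decide_mem_keys]
    have hk : pvRank.keys = pvPreferred := by decide
    rw [hk]; simpa using hy

lemma pvKey_mem_lt (x : String) (hx : x ∈ pvPreferred) : pvKey x < 11 := by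
  fin_cases hx <;> decide

lemma pvPreferred_pairwise : pvPreferred.Pairwise (fun a b => pvKey a < pvKey b) := by decide

-- stable insertion: x goes right between a not-before prefix and a before suffix
lemma insertBy_split {α : Type} (before : α → α → Bool) (x : α) (u w : List α)
    (hu : ∀ y ∈ u, before x y = false) (hw : ∀ y ∈ w, before x y = true) :
    PySem.List.insertBy before x (u ++ w) = u ++ x :: w := by
  induction u with
  | nil =>
    cases w with
    | nil => rfl
    | cons y ys =>
      simp [PySem.List.insertBy, hw y (by simp)]
  | cons a u ih =>
    have ha : before x a = false := hu a (by simp)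
    simp [PySem.List.insertBy, ha]
    exact ih (fun y hy => hu y (by simp [hy]))

-- A's append loop over nodup keys appends exactly the non-preferred names, in order
lemma A_loop (l : List String) (acc : List String) (hnd : l.Nodup)
    (hmem : ∀ n ∈ l, (n ∈ acc ↔ n ∈ pvPreferred)) :
    l.foldl (fun acc name => if acc.contains name then acc else acc ++ [name]) acc
      = acc ++ l.filter (fun n => decide (n ∉ pvPreferred)) := by
  induction l generalizing acc with
  | nil => simp
  | cons x l ih =>
    have hx := hmem x (by simp)
    rcases List.nodup_cons.mp hnd with ⟨hxl, hnd'⟩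
    by_cases hxp : x ∈ pvPreferred
    · have hxa : acc.contains x = true := by simp [hx.mpr hxp]
      simp only [List.foldl_cons, hxa, if_true]
      rw [ih acc hnd' (fun n hn => hmem n (by simp [hn]))]
      simp [hxp]
    · have hxa : acc.contains x = false := by
        simp only [List.contains_eq_mem, decide_eq_false_iff_not]
        exact fun h => hxp (hx.mp h)
      simp only [List.foldl_cons, hxa, Bool.false_eq_true, if_false]
      rw [ih (acc ++ [x]) hnd' ?_]
      · simp [hxp]
      · intro n hn
        have hnx : n ≠ x := fun h => hxl (h ▸ hn)
        simp [List.mem_append, hnx, hmem n (by simp [hn])]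

-- inserting a preferred name into (filtered preferred prefix ++ high-key tail)
lemma ins_pref (P : List String) (s t : List String) (x : String)
    (hx : x ∈ P) (hxs : x ∉ s)
    (hp : P.Pairwise (fun a b => pvKey a < pvKey b))
    (ht : ∀ y ∈ t, pvKey x < pvKey y) :
    PySem.List.insertBy (fun a b => decide (pvKey a < pvKey b)) x
        (P.filter (fun n => decide (n ∈ s)) ++ t)
      = P.filter (fun n => decide (n ∈ s ∨ n = x)) ++ t := by
  induction P with
  | nil => simp at hx
  | cons a P ih =>
    rcases List.pairwise_cons.mp hp with ⟨ha, hp'⟩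
    rcases List.mem_cons.mp hx with rfl | hxP
    · -- head is x itself; x ∉ s, everything after has larger key
      have hxP' : x ∉ P := fun h => lt_irrefl _ (ha x h)
      have : (x :: P).filter (fun n => decide (n ∈ s ∨ n = x))
          = x :: P.filter (fun n => decide (n ∈ s)) := by
        simp only [List.filter_cons]
        rw [if_pos (by simp), List.filter_congr]
        intro n hn
        have : n ≠ x := fun h => hxP' (h ▸ hn)
        simp [this]
      rw [this, List.filter_cons, if_neg (by simpa using hxs)]
      exact insertBy_split _ _ [] _ (by simp)
        (by
          intro y hy
          rcases List.mem_append.mp hy with hy | hy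
          · exact decide_eq_true (ha y (List.mem_of_mem_filter hy))
          · exact decide_eq_true (ht y hy))
    · have hax : a ≠ x := by rintro rfl; exact lt_irrefl _ (ha a hxP)
      by_cases has : a ∈ s
      · rw [List.filter_cons, List.filter_cons,
          if_pos (show decide (a ∈ s) = true by simp [has]),
          if_pos (show decide (a ∈ s ∨ a = x) = true by simp [has]),
          List.cons_append]
        rw [show PySem.List.insertBy (fun a b => decide (pvKey a < pvKey b)) x
              (a :: (List.filter (fun n => decide (n ∈ s)) P ++ t))
            = a :: PySem.List.insertBy (fun a b => decide (pvKey a < pvKey b)) x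
              (List.filter (fun n => decide (n ∈ s)) P ++ t) from by
          simp [PySem.List.insertBy, not_lt.mpr (le_of_lt (ha x hxP))]]
        rw [ih hxP hp', List.cons_append]
      · rw [List.filter_cons, List.filter_cons,
          if_neg (show ¬ decide (a ∈ s) = true by simp [has]),
          if_neg (show ¬ decide (a ∈ s ∨ a = x) = true by simp [has, hax])]
        exact ih hxP hp'

-- B's insertion-sort fold, characterised: preferred names in preferred order, then the rest in order
lemma B_loop (l : List String) (s : List String) (hnd : l.Nodup)
    (hdis : ∀ x ∈ l, x ∉ s) :
    l.foldl (fun acc x => PySem.List.insertBy (fun a b => decide (pvKey a < pvKey b)) x acc)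
        (pvPreferred.filter (fun n => decide (n ∈ s)) ++ s.filter (fun n => decide (n ∉ pvPreferred)))
      = pvPreferred.filter (fun n => decide (n ∈ s ++ l))
          ++ (s ++ l).filter (fun n => decide (n ∉ pvPreferred)) := by
  induction l generalizing s with
  | nil => simp
  | cons x l ih =>
    rcases List.nodup_cons.mp hnd with ⟨hxl, hnd'⟩
    have hxs : x ∉ s := hdis x (by simp)
    have hstep : PySem.List.insertBy (fun a b => decide (pvKey a < pvKey b)) x
        (pvPreferred.filter (fun n => decide (n ∈ s)) ++ s.filter (fun n => decide (n ∉ pvPreferred)))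
      = pvPreferred.filter (fun n => decide (n ∈ s ++ [x]))
          ++ (s ++ [x]).filter (fun n => decide (n ∉ pvPreferred)) := by
      by_cases hxp : x ∈ pvPreferred
      · rw [ins_pref pvPreferred s _ x hxp hxs pvPreferred_pairwise ?ht]
        · congr 1
          · exact List.filter_congr fun n _ => by simp [List.mem_append]
          · simp [List.filter_append, hxp]
        case ht =>
          intro y hy
          have hyp : y ∉ pvPreferred := by
            have := List.of_mem_filter hy; simpa using this
          rw [pvKey_not_mem y hyp]
          exact pvKey_mem_lt x hxp
      · have hfb : ∀ y ∈ pvPreferred.filter (fun n => decide (n ∈ s))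
              ++ s.filter (fun n => decide (n ∉ pvPreferred)),
            (fun a b => decide (pvKey a < pvKey b)) x y = false := by
          intro y hy
          show decide (pvKey x < pvKey y) = false
          rw [pvKey_not_mem x hxp]
          rcases List.mem_append.mp hy with hy | hy
          · have hyP : y ∈ pvPreferred := List.mem_of_mem_filter hy
            have := pvKey_mem_lt y hyP
            simp; omega
          · have hyp : y ∉ pvPreferred := by
              have := List.of_mem_filter hy; simpa using this
            rw [pvKey_not_mem y hyp]; simp
        rw [PySem.List.insertBy_of_forall_not_before _ _ _ hfb]
        have hfil : pvPreferred.filter (fun n => decide (n ∈ s))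
            = pvPreferred.filter (fun n => decide (n ∈ s ++ [x])) :=
          List.filter_congr fun n hn => by
            have hnx : n ≠ x := fun h => hxp (h ▸ hn)
            simp [List.mem_append, hnx]
        rw [hfil]
        simp [List.filter_append, hxp, List.append_assoc]
    rw [List.foldl_cons, hstep, ih (s ++ [x]) hnd' ?_]
    · simp
    · intro y hy
      simp only [List.mem_append, List.mem_singleton]
      rintro (h | rfl)
      · exact hdis y (by simp [hy]) h
      · exact hxl hy

-- ===== VERDICT (by name: the statement is the Claim_ definition above) =====
theorem suggest_param_candidates_py_spec : Claim_equal_suggest_param_candidates_py := by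
  intro params _
  unfold Spec_suggest_param_candidates_py suggest_param_candidates_py suggest_param_candidates_py_alt
  set N : PySem.Dict String Int :=
    (PySem.Dict.ofList params).items.foldl (fun d kv => d.insert kv.1 kv.2) PySem.Dict.empty with hN
  have hnd : N.keys.Nodup := by
    rw [hN]
    exact PySem.Dict.nodup_keys_foldl_insert_key _ _ _ _ (by simp [PySem.Dict.keys_empty])
  show N.keys.foldl (fun acc name => if acc.contains name then acc else acc ++ [name])
      (pvPreferred.filter (fun name => N.contains name))
    = PySem.List.sorted N.keys pvKey false
  rw [PySem.List.sorted_eq_foldl_insertBy]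
  have hinit : pvPreferred.filter (fun name => N.contains name)
      = pvPreferred.filter (fun n => decide (n ∈ N.keys)) := by
    apply List.filter_congr
    intro n _
    rw [PySem.Dict.contains_eq_decide_mem_keys]
  rw [hinit]
  rw [A_loop N.keys _ hnd (fun n hn => by simp [hn])]
  have := B_loop N.keys [] hnd (by simp)
  simpa using this.symm
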